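-- pv_equiv track=rewrite | github.com/AMIVAYUN/codeTestPrac | Programmers/2비트 큰수.py | solution
-- ===== SOURCE A (Python) =====
-- def solution( numbers ):
--     answer = [];
--     for number in numbers:
--         if( number % 4 == 3 ):
--             bi = [ '0' ] + list( bin( number )[ 2: ] )
--
--             for i in range( len( bi ) - 1, -1 , -1):
--                 if( bi[ i ] == '0' ):
--                     bi[ i ] = '1'
--                     bi[ i + 1 ] = '0'
--
--                     break;
--
--             str0 = ''.join( bi );
--
--             answer.append( int( str0 , 2 ) );
--
--         else:
--             answer.append( number + 1 );
--     return answer;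
-- ===== SOURCE B (Python) =====
-- def solution(numbers):
--     # Closed-form bit trick: a number with n % 4 == 3 has t >= 2 trailing one
--     # bits; the "next 2-bit-bigger" value adds 2^(t-1), and n ^ (n+1) == 2^(t+1)-1
--     # exposes t without building a binary string.
--     return [n + (((n ^ (n + 1)) + 1) >> 2) if n % 4 == 3 else n + 1
--             for n in numbers]
-- ===== Notes on version B (the rewrite author's own statement) =====
-- stated objective: alternative
-- what changed: Replaces the per-element binary-string build, right-to-left character scan and int(s,2) re-parse by the closed-form bit trick n + (((n ^ (n+1)) + 1) >> 2) inside a single comprehension.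
-- outside the precondition, e.g. on solution([-1]): A returns [5], B returns [-1]; on solution([-5]): A returns [6], B returns [-3]
import Mathlib
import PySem

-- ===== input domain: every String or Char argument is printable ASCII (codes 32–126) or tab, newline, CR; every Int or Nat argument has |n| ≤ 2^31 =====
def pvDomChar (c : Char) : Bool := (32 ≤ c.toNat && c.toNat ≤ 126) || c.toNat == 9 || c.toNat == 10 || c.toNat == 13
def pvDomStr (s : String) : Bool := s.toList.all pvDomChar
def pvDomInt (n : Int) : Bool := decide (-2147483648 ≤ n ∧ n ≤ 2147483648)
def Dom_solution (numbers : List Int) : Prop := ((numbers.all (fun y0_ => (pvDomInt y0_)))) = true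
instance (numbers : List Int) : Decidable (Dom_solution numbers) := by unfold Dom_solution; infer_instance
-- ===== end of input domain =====

-- B replaces A's per-element binary-string build / right-to-left character scan / int(s,2)
-- re-parse by the closed-form bit trick n + (((n ^ (n+1)) + 1) >> 2) (objective: alternative).

-- ===== PORT A =====
-- bin(m)[2:] for m : Nat, msb first (bin(0)[2:] = "0")
def binDigits : Nat → List Char
  | 0 => []
  | m+1 => binDigits ((m+1)/2) ++ [if (m+1) % 2 = 1 then '1' else '0']
decreasing_by omega

def binNat (m : Nat) : List Char := if m = 0 then ['0'] else binDigits m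

-- bin(number)[2:] as a list of chars ('-0b…'[2:] keeps the 'b' for negative numbers)
def pyBin (n : Int) : List Char := if n < 0 then 'b' :: binNat (-n).toNat else binNat n.toNat

-- A's inner loop 'for i in range(len(bi)-1, -1, -1): if bi[i] == '0': …; break'
-- (fuel = how many indices remain to scan; fires at the rightmost '0'; on the lists this
-- algorithm builds the write at i+1 is always in range)
def findFix (bi : List Char) : Nat → List Char
  | 0 => bi
  | i+1 => if bi.getD i ' ' = '0' then (bi.set i '1').set (i+1) '0' else findFix bi i

-- int(s, 2) — exact on the '0'/'1' strings (optionally prefixed '0b') this algorithm produces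
def parseBin (cs : List Char) : Int :=
  let ds : List Char := if cs.take 2 = ['0', 'b'] then cs.drop 2 else cs
  ((ds.foldl (fun a c => 2*a + (if c = '1' then 1 else 0)) 0 : Nat) : Int)

def solution (numbers : List Int) : List Int :=
  numbers.foldl (fun answer number =>
    if PySem.Int.mod number 4 = 3 then
      answer ++ [parseBin (findFix ('0' :: pyBin number) ('0' :: pyBin number).length)]
    else
      answer ++ [number + 1]) []

-- ===== PORT B =====
def solution_alt (numbers : List Int) : List Int :=
  numbers.map (fun n =>
    if PySem.Int.mod n 4 = 3 then n + ((PySem.Int.bxor n (n + 1) + 1) >>> (2:Nat))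
    else n + 1)

-- ===== PRECONDITION & SPEC =====
-- Pre_ excludes only lists with an element n < 0, n % 4 == 3 (n = -1, -5, -9, …): these lie
-- outside the problem's natural domain and A's value there (e.g. 5 for -1) is an artefact of
-- slicing bin()'s '-0b' prefix; B returns the bit-trick value instead.
def Pre_solution (numbers : List Int) : Prop :=
  ∀ n ∈ numbers, ¬(n < 0 ∧ PySem.Int.mod n 4 = 3)
instance (numbers : List Int) : Decidable (Pre_solution numbers) := by
  unfold Pre_solution; infer_instance

def pvWitness_solution : List Int := [3, 7, 2, -2, 510, 0]

def Spec_solution (numbers : List Int) (out : List Int) : Prop := out = solution_alt numbers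
instance (numbers : List Int) (out : List Int) : Decidable (Spec_solution numbers out) := by
  unfold Spec_solution; infer_instance

-- ===== CLAIM (what is proved, stated in full; the proofs are below) =====
def Claim_equal_solution : Prop :=
  ∀ (numbers : List Int), Dom_solution numbers → Pre_solution numbers →
    Spec_solution numbers (solution numbers)

-- ===== LEMMAS AND PROOFS =====

theorem binDigits_eq (n : Nat) (h : n ≠ 0) :
    binDigits n = binDigits (n/2) ++ [if n % 2 = 1 then '1' else '0'] := by
  cases n with
  | zero => exact absurd rfl h
  | succ m => rw [binDigits]

theorem binDigits_odd (k : Nat) : binDigits (2*k+1) = binDigits k ++ ['1'] := by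
  rw [binDigits_eq (2*k+1) (by omega)]
  have h1 : (2*k+1)/2 = k := by omega
  have h2 : (2*k+1) % 2 = 1 := by omega
  rw [h1, h2]; simp

theorem binDigits_even (k : Nat) (hk : k ≠ 0) : binDigits (2*k) = binDigits k ++ ['0'] := by
  rw [binDigits_eq (2*k) (by omega)]
  have h1 : (2*k)/2 = k := by omega
  have h2 : (2*k) % 2 = 0 := by omega
  rw [h1, h2]; simp

theorem binDigits_no_b (m : Nat) : 'b' ∉ binDigits m := by
  induction m using Nat.strong_induction_on with
  | _ m ih =>
    match m with
    | 0 => simp [binDigits]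
    | (k+1) =>
      rw [binDigits_eq (k+1) (by omega)]
      intro hmem
      rcases List.mem_append.mp hmem with h | h
      · exact ih ((k+1)/2) (by omega) h
      · split at h <;> simp_all

theorem split_form (k t : Nat) :
    k * 2^(t+1) + (2^(t+1) - 1) = 2*(k * 2^t + (2^t - 1)) + 1 := by
  obtain ⟨q, hq⟩ : ∃ q, 2^t = q + 1 := ⟨2^t - 1, by have := Nat.two_pow_pos t; omega⟩
  rw [pow_succ, hq]
  rw [show (q+1)*2 - 1 = 2*q + 1 from by omega, show (q+1) - 1 = q from by omega]
  ring

-- decomposition: a number with t trailing one-bits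
theorem binDigits_trailing_ones (t : Nat) :
    ∀ k, binDigits (k * 2^t + (2^t - 1)) = binDigits k ++ List.replicate t '1' := by
  induction t with
  | zero => intro k; simp
  | succ t ih =>
    intro k
    rw [split_form k t, binDigits_odd, ih k, List.replicate_succ', List.append_assoc]

-- xor of m and m+1 when m has exactly t trailing one-bits
theorem xor_succ_trailing (t : Nat) :
    ∀ e, ((2*e) * 2^t + (2^t - 1)) ^^^ ((2*e) * 2^t + 2^t) = 2^(t+1) - 1 := by
  induction t with
  | zero =>
    intro e
    have h1 : (2*e) * 2^0 + (2^0 - 1) = Nat.bit false e := by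
      rw [Nat.bit_false_apply]; simp
    have h2 : (2*e) * 2^0 + 2^0 = Nat.bit true e := by
      rw [Nat.bit_true_apply]; simp
    rw [h1, h2, Nat.xor_bit]
    simp [Nat.bit_true_apply]
  | succ t ih =>
    intro e
    have h1 : (2*e) * 2^(t+1) + (2^(t+1) - 1)
        = Nat.bit true ((2*e) * 2^t + (2^t - 1)) := by
      rw [Nat.bit_true_apply]; exact split_form (2*e) t
    have h2 : (2*e) * 2^(t+1) + 2^(t+1) = Nat.bit false ((2*e) * 2^t + 2^t) := by
      rw [Nat.bit_false_apply, pow_succ]; ring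
    rw [h1, h2, Nat.xor_bit, ih e]
    rw [show (true != false) = true from rfl, Nat.bit_true_apply]
    have hp1 : 0 < 2^(t+1) := Nat.two_pow_pos (t+1)
    rw [show (2:Nat)^(t+1+1) = 2^(t+1)*2 from by rw [pow_succ]]
    omega

-- the scan: skip all-ones indices above p, fire at p
theorem findFix_skip (bi : List Char) (p : Nat) (hp : bi.getD p ' ' = '0')
    (k : Nat) (h : ∀ j, j < k → bi.getD (p+1+j) ' ' ≠ '0') :
    findFix bi (p+1+k) = (bi.set p '1').set (p+1) '0' := by
  induction k with
  | zero =>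
    show findFix bi (p+1) = _
    rw [findFix, if_pos hp]
  | succ k ih =>
    have hne : bi.getD (p+1+k) ' ' ≠ '0' := h k (by omega)
    have heq : p+1+(k+1) = (p+1+k)+1 := by omega
    rw [heq, findFix, if_neg hne]
    exact ih (fun j hj => h j (by omega))

theorem getD_append_right_len {α : Type} (l1 l2 : List α) (i : Nat) (d : α) :
    (l1 ++ l2).getD (l1.length + i) d = l2.getD i d := by
  simp [List.getD_eq_getElem?_getD, List.getElem?_append_right (Nat.le_add_right l1.length i)]

theorem getD_replicate_one (t j : Nat) (hj : j < t) :
    (List.replicate t '1').getD j ' ' = '1' := by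
  simp [List.getD_eq_getElem?_getD, hj]

-- the two writes on pre ++ '0' :: replicate (s+1) '1'
theorem set_two (pre : List Char) (s : Nat) :
    (((pre ++ '0' :: List.replicate (s+1) '1').set pre.length '1').set (pre.length + 1) '0')
      = pre ++ '1' :: '0' :: List.replicate s '1' := by
  induction pre with
  | nil => simp [List.replicate_succ]
  | cons c l ih =>
    simp only [List.cons_append, List.length_cons, List.set_cons_succ]
    rw [ih]

-- binary value of a digit list
def binVal (cs : List Char) : Nat := cs.foldl (fun a c => 2*a + (if c = '1' then 1 else 0)) 0

theorem binVal_foldl_init (cs : List Char) :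
    ∀ a : Nat, cs.foldl (fun a c => 2*a + (if c = '1' then 1 else 0)) a
      = a * 2^cs.length + binVal cs := by
  induction cs with
  | nil => intro a; simp [binVal]
  | cons c l ih =>
    intro a
    simp only [List.foldl_cons, List.length_cons]
    rw [ih (2*a + (if c = '1' then 1 else 0))]
    rw [show binVal (c :: l) = l.foldl (fun a c => 2*a + (if c = '1' then 1 else 0))
          (2*0 + (if c = '1' then 1 else 0)) from rfl]
    rw [ih (2*0 + (if c = '1' then 1 else 0))]
    ring

theorem binVal_append (l1 l2 : List Char) :
    binVal (l1 ++ l2) = binVal l1 * 2^l2.length + binVal l2 := by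
  rw [binVal, List.foldl_append, binVal_foldl_init]
  rfl

theorem binVal_replicate_one (t : Nat) : binVal (List.replicate t '1') = 2^t - 1 := by
  induction t with
  | zero => simp [binVal]
  | succ t ih =>
    have hp : 0 < 2^t := Nat.two_pow_pos t
    rw [List.replicate_succ', binVal_append, ih]
    simp [binVal]
    have h2 : 2^(t+1) = 2 * 2^t := by ring
    omega

theorem binVal_binDigits (m : Nat) : binVal (binDigits m) = m := by
  induction m using Nat.strong_induction_on with
  | _ m ih =>
    match m with
    | 0 => simp [binDigits, binVal]
    | (k+1) =>
      rw [binDigits_eq (k+1) (by omega), binVal_append, ih ((k+1)/2) (by omega)]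
      have h2 : (k+1) % 2 = 1 ∨ (k+1) % 2 = 0 := by omega
      rcases h2 with h2 | h2 <;> simp [h2, binVal] <;> omega

-- parseBin on a list that contains no 'b'
theorem parseBin_eq_binVal (cs : List Char) (h : 'b' ∉ cs) :
    parseBin cs = ((binVal cs : Nat) : Int) := by
  rw [parseBin]
  have hne : cs.take 2 ≠ ['0', 'b'] := by
    intro hc
    exact h (List.take_subset 2 cs (by rw [hc]; simp))
  rw [if_neg hne]
  rfl

-- the per-element identity on a nonnegative n = ↑m with m % 4 == 3
theorem elem_eq (m : Nat) (hm : m % 4 = 3) :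
    parseBin (findFix ('0' :: binNat m) ('0' :: binNat m).length)
      = (m : Int) + ((PySem.Int.bxor (m : Int) ((m : Int) + 1) + 1) >>> (2:Nat)) := by
  obtain ⟨t, c, hc, hmc⟩ :=
    Nat.exists_eq_pow_mul_and_not_dvd (n := m+1) (by omega) 2 (by norm_num)
  have hcodd : c % 2 = 1 := by
    rcases Nat.mod_two_eq_zero_or_one c with h | h
    · exact absurd (Nat.dvd_of_mod_eq_zero h) hc
    · exact h
  obtain ⟨e, he⟩ : ∃ e, c = 2*e + 1 := ⟨c/2, by omega⟩
  have hp : 0 < 2^t := Nat.two_pow_pos t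
  have hmform : m = (2*e) * 2^t + (2^t - 1) := by
    have h1 : m + 1 = 2^t * (2*e+1) := by rw [hmc, he]
    have h2 : 2^t * (2*e+1) = (2*e)*2^t + 2^t := by ring
    omega
  have ht1 : 1 ≤ t := by
    by_contra h
    have ht0 : t = 0 := by omega
    rw [ht0] at hmform; simp at hmform; omega
  have hmne : m ≠ 0 := by omega
  have hdig : binDigits m = binDigits (2*e) ++ List.replicate t '1' := by
    rw [hmform]; exact binDigits_trailing_ones t (2*e)
  -- bi = pre ++ '0' :: replicate t '1', with pre a 'b'-free list of value e·2 ... see hpreval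
  obtain ⟨pre, hpre, hpreval, hpreb⟩ :
      ∃ pre : List Char, '0' :: binDigits m = pre ++ '0' :: List.replicate t '1'
        ∧ binVal pre * 2^(t+1) = (2*e) * 2^t ∧ 'b' ∉ pre := by
    by_cases hez : e = 0
    · refine ⟨[], ?_, by simp [binVal, hez], by simp⟩
      rw [hdig, hez]; simp [binDigits]
    · refine ⟨'0' :: binDigits e, ?_, ?_, ?_⟩
      · rw [hdig, binDigits_even e hez]; simp
      · have h1 : binVal ('0' :: binDigits e) = binVal (binDigits e) := by
          rw [show ('0' :: binDigits e) = ['0'] ++ binDigits e from rfl, binVal_append]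
          simp [binVal]
        rw [h1, binVal_binDigits, pow_succ]; ring
      · intro hmem
        rcases List.mem_cons.mp hmem with h | h
        · simp at h
        · exact binDigits_no_b e h
  obtain ⟨s, hs⟩ : ∃ s, t = s + 1 := ⟨t - 1, by omega⟩
  have hbi : '0' :: binNat m = pre ++ '0' :: List.replicate t '1' := by
    rw [binNat, if_neg hmne]; exact hpre
  have hlen : ('0' :: binNat m).length = pre.length + 1 + t := by
    have h1 := congrArg List.length hbi
    simp at h1
    simp [h1]
    omega
  have hget0 : (pre ++ '0' :: List.replicate t '1').getD pre.length ' ' = '0' := by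
    have h1 := getD_append_right_len pre ('0' :: List.replicate t '1') 0 ' '
    simpa using h1
  have hget1 : ∀ j, j < t →
      (pre ++ '0' :: List.replicate t '1').getD (pre.length + 1 + j) ' ' ≠ '0' := by
    intro j hj
    rw [show pre.length + 1 + j = pre.length + (1 + j) from by omega,
      getD_append_right_len pre ('0' :: List.replicate t '1') (1+j) ' ']
    rw [show (1 + j) = j + 1 from by omega]
    rw [show ('0' :: List.replicate t '1').getD (j+1) ' ' = (List.replicate t '1').getD j ' '
      from by simp [List.getD]]
    rw [getD_replicate_one t j hj]
    decide
  have hfix : findFix ('0' :: binNat m) (('0' :: binNat m).length)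
      = pre ++ '1' :: '0' :: List.replicate s '1' := by
    rw [hlen, hbi,
      findFix_skip (pre ++ '0' :: List.replicate t '1') pre.length hget0 t hget1, hs]
    exact set_two pre s
  rw [hfix]
  -- no 'b' occurs in the fixed list
  have hb2 : 'b' ∉ pre ++ '1' :: '0' :: List.replicate s '1' := by
    intro hmem
    rcases List.mem_append.mp hmem with h | h
    · exact hpreb h
    · simp [List.mem_replicate] at h
  rw [parseBin_eq_binVal _ hb2]
  -- the A-side value
  have hval : binVal (pre ++ '1' :: '0' :: List.replicate s '1') = m + 2^s := by
    rw [show ('1' :: '0' :: List.replicate s '1') = ['1', '0'] ++ List.replicate s '1'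
      from rfl]
    rw [← List.append_assoc, binVal_append, binVal_append, binVal_replicate_one]
    have h1 : binVal ['1', '0'] = 2 := by decide
    rw [h1]
    have hPs : 0 < 2^s := Nat.two_pow_pos s
    have h2 : (2:Nat)^(t+1) = 2^s * 4 := by
      rw [hs, show s+1+1 = s+2 from rfl, pow_succ, pow_succ]; ring
    have h3 : (2:Nat)^t = 2^s * 2 := by rw [hs, pow_succ]
    have h4 : (List.replicate s '1').length = s := by simp
    have h5 : binVal pre * 2^(t+1) = 2*e*2^t := hpreval
    have h6 : ((['1', '0'] : List Char)).length = 2 := by decide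
    rw [h4, h6]
    have h7 : (binVal pre * 2 ^ 2 + 2) * 2 ^ s = binVal pre * 2^(t+1) + 2 * 2^s := by
      rw [h2]; ring
    rw [h7, h5, hmform, h3]
    omega
  rw [hval]
  -- the B-side value
  have hc1 : ((m:Int)+1) = ((m+1 : Nat) : Int) := by push_cast; ring
  rw [hc1, PySem.Int.bxor_natCast m (m+1)]
  have hx : m ^^^ (m+1) = 2^(t+1) - 1 := by
    rw [show m + 1 = (2*e) * 2^t + 2^t from by omega,
      show m = (2*e) * 2^t + (2^t - 1) from hmform]
    exact xor_succ_trailing t e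
  rw [hx]
  have hp1 : (1:Nat) ≤ 2^(t+1) := Nat.two_pow_pos (t+1)
  have hc2 : (((2^(t+1) - 1 : Nat) : Int) + 1) = ((2^(t+1) : Nat) : Int) := by
    rw [Nat.cast_sub hp1]; push_cast; ring
  rw [hc2]
  have hshift : (((2^(t+1) : Nat) : Int)) >>> (2:Nat) = ((2^(t+1) >>> 2 : Nat) : Int) := rfl
  rw [hshift]
  have hsr : (2:Nat)^(t+1) >>> 2 = 2^s := by
    rw [Nat.shiftRight_eq_div_pow]
    rw [show (2:Nat)^(t+1) = 2^s * 2^2 from by rw [hs, show s+1+1 = s+2 from rfl, pow_add]]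
    omega
  rw [hsr]
  push_cast
  ring

-- fold with trailing append = map
theorem foldl_append_map (g : Int → Int) (l : List Int) :
    ∀ init : List Int, l.foldl (fun a x => a ++ [g x]) init = init ++ l.map g := by
  induction l with
  | nil => intro init; simp
  | cons x l ih => intro init; simp [ih]

-- ===== VERDICT (by name: the statement is the Claim_ definition above) =====
theorem solution_spec : Claim_equal_solution := by
  unfold Claim_equal_solution
  intro numbers _hdom hpre
  unfold Spec_solution solution solution_alt
  have hbody : (fun (answer : List Int) (number : Int) =>
      if PySem.Int.mod number 4 = 3 then
        answer ++ [parseBin (findFix ('0' :: pyBin number) ('0' :: pyBin number).length)]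
      else answer ++ [number + 1])
    = fun answer number => answer ++
        [if PySem.Int.mod number 4 = 3 then
           parseBin (findFix ('0' :: pyBin number) ('0' :: pyBin number).length)
         else number + 1] := by
    funext a x; split <;> rfl
  rw [hbody, foldl_append_map, List.nil_append]
  apply List.map_congr_left
  intro x hx
  by_cases hc : PySem.Int.mod x 4 = 3
  · rw [if_pos hc, if_pos hc]
    have hx0 : ¬ x < 0 := fun hneg => hpre x hx ⟨hneg, hc⟩
    have hxm : x = ((x.toNat : Nat) : Int) := (Int.toNat_of_nonneg (by omega)).symm
    have hm34 : x.toNat % 4 = 3 := by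
      have h := PySem.Int.mod_natCast x.toNat 4
      push_cast at h
      rw [hxm, h] at hc
      exact_mod_cast hc
    rw [pyBin, if_neg hx0]
    rw [hxm]
    exact elem_eq x.toNat hm34
  · rw [if_neg hc, if_neg hc]
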